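-- pv_equiv track=rewrite | github.com/Sputchik/program-downloader | update_urls.py | extract_versions
-- ===== SOURCE A (Python) =====
-- def extract_versions(versions: dict[str, str]) -> str:
-- 	preferred_exe = None
-- 	selected_exe = False
-- 	preferred_msi = None
--
-- 	for key in versions:
-- 		if key.endswith('.msi') and 'arm' not in key:
-- 			# Check if it's a preferred '64' version
-- 			if '64' in key:
-- 				preferred_msi = key
-- 				break
-- 			elif '32' in key and not preferred_msi:
-- 				preferred_msi = key
-- 			elif not preferred_msi:
-- 				preferred_msi = key
--
-- 		elif key.endswith('.exe') and 'arm' not in key: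
-- 			# Check if it's a preferred '64' version
-- 			if '64' in key and not selected_exe:
-- 				preferred_exe = key
-- 				selected_exe = True
-- 			elif '32' in key and not preferred_exe:
-- 				preferred_exe = key
-- 			elif not preferred_exe:
-- 				preferred_exe = key
--
-- 	preferred_key = preferred_msi if preferred_msi else preferred_exe
-- 	return preferred_key
-- ===== SOURCE B (Python) =====
-- def extract_versions(versions: dict[str, str]) -> str:
-- 	msi = [k for k in versions if k.endswith('.msi') and 'arm' not in k]
-- 	exe = [k for k in versions if k.endswith('.exe') and 'arm' not in k]
--
-- 	def pick(keys):
-- 		for k in keys: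
-- 			if '64' in k:
-- 				return k
-- 		return keys[0] if keys else None
--
-- 	return pick(msi) if msi else pick(exe)
-- ===== Notes on version B (the rewrite author's own statement) =====
-- stated objective: simpler
-- what changed: Replaces the single stateful loop (two Option accumulators, a selected flag and a break) by partitioning keys into msi/exe candidate lists and one pick() helper returning the first key containing '64' else the first key; this works because A's '32' and plain-else branches are identical (first non-64 key wins) and '64' always takes priority.
import Mathlib
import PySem

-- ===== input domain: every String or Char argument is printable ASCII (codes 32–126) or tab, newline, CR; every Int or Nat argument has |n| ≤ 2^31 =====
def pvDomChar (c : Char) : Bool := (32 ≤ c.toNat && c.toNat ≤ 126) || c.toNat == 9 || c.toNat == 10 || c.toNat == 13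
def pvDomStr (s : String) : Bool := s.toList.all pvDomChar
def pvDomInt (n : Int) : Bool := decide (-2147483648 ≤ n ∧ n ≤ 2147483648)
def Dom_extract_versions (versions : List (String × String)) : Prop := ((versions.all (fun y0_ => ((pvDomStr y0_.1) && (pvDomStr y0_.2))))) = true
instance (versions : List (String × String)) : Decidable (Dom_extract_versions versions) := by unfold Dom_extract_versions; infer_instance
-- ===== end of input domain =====

-- B replaces A's single stateful loop (two accumulators, a flag and a break) by a
-- partition of the keys into msi/exe candidate lists and one shared pick helper (simpler).

-- ===== PORT A =====
-- Python truthiness of an Optional[str]: None and "" are falsy.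
def pvTruthy : Option String → Bool
  | none => false
  | some s => s != ""

-- 'preferred_key = preferred_msi if preferred_msi else preferred_exe'
def evFinish (pe pm : Option String) : Option String :=
  if pvTruthy pm then pm else pe

-- the for-loop of A over (preferred_exe, selected_exe, preferred_msi); break returns evFinish directly
def evLoopA : List (String × String) → Option String → Bool → Option String → Option String
  | [], pe, _, pm => evFinish pe pm
  | (k, _) :: rest, pe, se, pm =>
    if PySem.Str.endswith k ".msi" && !(PySem.Str.isIn "arm" k) then
      if PySem.Str.isIn "64" k then evFinish pe (some k)          -- break
      else if PySem.Str.isIn "32" k && !(pvTruthy pm) then evLoopA rest pe se (some k)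
      else if !(pvTruthy pm) then evLoopA rest pe se (some k)
      else evLoopA rest pe se pm
    else if PySem.Str.endswith k ".exe" && !(PySem.Str.isIn "arm" k) then
      if PySem.Str.isIn "64" k && !se then evLoopA rest (some k) true pm
      else if PySem.Str.isIn "32" k && !(pvTruthy pe) then evLoopA rest (some k) se pm
      else if !(pvTruthy pe) then evLoopA rest (some k) se pm
      else evLoopA rest pe se pm
    else evLoopA rest pe se pm

def extract_versions (versions : List (String × String)) : Option String :=
  evLoopA versions none false none

-- ===== PORT B =====
def evIsMsi (k : String) : Bool := PySem.Str.endswith k ".msi" && !(PySem.Str.isIn "arm" k)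
def evIsExe (k : String) : Bool := PySem.Str.endswith k ".exe" && !(PySem.Str.isIn "arm" k)

-- the loop inside pick: first key containing '64'
def evPick64 : List String → Option String
  | [] => none
  | k :: rest => if PySem.Str.isIn "64" k then some k else evPick64 rest

-- pick(keys): first '64' key, else keys[0] if keys else None
def evPick (keys : List String) : Option String :=
  match evPick64 keys with
  | some k => some k
  | none => keys.head?

def extract_versions_alt (versions : List (String × String)) : Option String :=
  let msi := (versions.map Prod.fst).filter evIsMsi
  let exe := (versions.map Prod.fst).filter evIsExe
  if msi ≠ [] then evPick msi else evPick exe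

-- ===== PRECONDITION & SPEC =====
def Spec_extract_versions (versions : List (String × String)) (out : Option String) : Prop := out = extract_versions_alt versions
instance (versions : List (String × String)) (out : Option String) : Decidable (Spec_extract_versions versions out) := by unfold Spec_extract_versions; infer_instance

-- ===== CLAIM (what is proved, stated in full; the proofs are below) =====
def Claim_equal_extract_versions : Prop := ∀ (versions : List (String × String)), Dom_extract_versions versions → Spec_extract_versions versions (extract_versions versions)

-- ===== LEMMAS AND PROOFS =====

-- first-some combinator, the common shape of both programs' selections
def evOr (a b : Option String) : Option String :=
  match a with
  | some x => some x
  | none => b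

theorem evOr_some (x : String) (b : Option String) : evOr (some x) b = some x := rfl
theorem evOr_none (b : Option String) : evOr none b = b := rfl

theorem evPick_eq (keys : List String) : evPick keys = evOr (evPick64 keys) keys.head? := rfl

-- closed form of A's loop result from a general (reachable) state
def evForm (l : List (String × String)) (pe : Option String) (se : Bool) (pm : Option String) : Option String :=
  let msi := (l.map Prod.fst).filter evIsMsi
  let exe := (l.map Prod.fst).filter evIsExe
  evOr (evPick64 msi)
    (if pvTruthy pm then pm
     else evOr msi.head?
       (if se then pe
        else evOr (evPick64 exe) (if pvTruthy pe then pe else exe.head?)))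

-- a key ending '.msi'/'.exe' is nonempty (the suffix has length 4)
theorem evEndswith_ne_empty (k s : String) (hs : s.toList ≠ [])
    (h : PySem.Str.endswith k s = true) : k ≠ "" := by
  intro hk
  subst hk
  rw [PySem.Str.endswith_eq] at h
  have h2 := (PySem.Chars.endswith_iff _ _).mp h
  have h3 : s.toList = [] := List.suffix_nil.mp (by simpa using h2)
  exact hs h3

-- a key cannot end with both '.msi' and '.exe'
theorem evMsi_exe_disjoint (k : String) (h : PySem.Str.endswith k ".msi" = true) :
    PySem.Str.endswith k ".exe" = false := by
  cases hx : PySem.Str.endswith k ".exe" with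
  | false => rfl
  | true =>
    exfalso
    rw [PySem.Str.endswith_eq] at h hx
    have s1 := (PySem.Chars.endswith_iff _ _).mp h
    have s2 := (PySem.Chars.endswith_iff _ _).mp hx
    rcases List.suffix_or_suffix_of_suffix s1 s2 with hs | hs
    · exact absurd (hs.eq_of_length (by decide)) (by decide)
    · exact absurd (hs.eq_of_length (by decide)) (by decide)

theorem evLoopA_eq (l : List (String × String)) (pe : Option String) (se : Bool) (pm : Option String)
    (hpm : ∀ m, pm = some m → (m ≠ "" ∧ PySem.Str.isIn "64" m = false))
    (hpe : pvTruthy pe = false → pe = none)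
    (hse : se = true → pvTruthy pe = true) :
    evLoopA l pe se pm = evForm l pe se pm := by
  induction l generalizing pe se pm with
  | nil =>
    by_cases hpmT : pvTruthy pm = true
    · simp only [evLoopA, evForm, evFinish, List.map_nil, List.filter_nil, evPick64, evOr_none,
        List.head?_nil, hpmT, if_true]
    · have h0 : pvTruthy pm = false := Bool.eq_false_iff.mpr hpmT
      cases se with
      | true =>
        simp only [evLoopA, evForm, evFinish, List.map_nil, List.filter_nil, evPick64, evOr_none,
          List.head?_nil, h0, Bool.false_eq_true, if_false, if_true]
      | false =>
        by_cases hpeT : pvTruthy pe = true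
        · simp only [evLoopA, evForm, evFinish, List.map_nil, List.filter_nil, evPick64, evOr_none,
            List.head?_nil, h0, hpeT, Bool.false_eq_true, if_false, if_true]
        · have h1 : pe = none := hpe (Bool.eq_false_iff.mpr hpeT)
          subst h1
          simp only [evLoopA, evForm, evFinish, List.map_nil, List.filter_nil, evPick64, evOr_none,
            List.head?_nil, pvTruthy, Bool.false_eq_true, if_false]
          rfl
  | cons p rest ih =>
    obtain ⟨k, v⟩ := p
    by_cases hm : (PySem.Str.endswith k ".msi" && !(PySem.Str.isIn "arm" k)) = true
    · have hm2 := hm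
      simp only [Bool.and_eq_true] at hm2
      have h1 : PySem.Str.endswith k ".msi" = true := hm2.1
      have hmsi : evIsMsi k = true := hm
      have hexe : evIsExe k = false := by
        simp only [evIsExe, evMsi_exe_disjoint k h1, Bool.false_and]
      have hk : k ≠ "" := evEndswith_ne_empty k ".msi" (by decide) h1
      have hkT : pvTruthy (some k) = true := by simp [pvTruthy, hk]
      by_cases h64 : PySem.Str.isIn "64" k = true
      · simp only [evLoopA, evForm, evFinish, hm, h64, hkT, if_true, List.map_cons,
          List.filter_cons, hmsi, hexe, evPick64, evOr_some, Bool.false_eq_true, if_false]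
      · have h64f : PySem.Str.isIn "64" k = false := Bool.eq_false_iff.mpr h64
        by_cases hpmT : pvTruthy pm = true
        · rw [show evLoopA ((k, v) :: rest) pe se pm = evLoopA rest pe se pm from by
            simp only [evLoopA, hm, h64f, hpmT, if_true, Bool.not_true, Bool.and_false,
              Bool.false_eq_true, if_false]]
          rw [ih pe se pm hpm hpe hse]
          simp only [evForm, List.map_cons, List.filter_cons, hmsi, hexe, evPick64, h64f,
            Bool.false_eq_true, if_false, if_true, hpmT]
        · have h0 : pvTruthy pm = false := Bool.eq_false_iff.mpr hpmT
          rw [show evLoopA ((k, v) :: rest) pe se pm = evLoopA rest pe se (some k) from by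
            simp only [evLoopA, hm, h64f, h0, if_true, Bool.not_false, Bool.and_true,
              Bool.false_eq_true, if_false, ite_self]]
          rw [ih pe se (some k) (by intro m hm'; cases hm'; exact ⟨hk, h64f⟩) hpe hse]
          simp only [evForm, List.map_cons, List.filter_cons, hmsi, hexe, evPick64, h64f, h0, hkT,
            Bool.false_eq_true, if_false, if_true, List.head?_cons, evOr_some]
    · have hmF : (PySem.Str.endswith k ".msi" && !(PySem.Str.isIn "arm" k)) = false :=
        Bool.eq_false_iff.mpr hm
      have hmsi : evIsMsi k = false := hmF
      by_cases he : (PySem.Str.endswith k ".exe" && !(PySem.Str.isIn "arm" k)) = true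
      · have he2 := he
        simp only [Bool.and_eq_true] at he2
        have h1 : PySem.Str.endswith k ".exe" = true := he2.1
        have hexe : evIsExe k = true := he
        have hk : k ≠ "" := evEndswith_ne_empty k ".exe" (by decide) h1
        have hkT : pvTruthy (some k) = true := by simp [pvTruthy, hk]
        by_cases h64 : PySem.Str.isIn "64" k = true
        · cases se with
          | false =>
            rw [show evLoopA ((k, v) :: rest) pe false pm = evLoopA rest (some k) true pm from by
              simp only [evLoopA, hmF, he, h64, Bool.not_false, Bool.and_true, if_true,
                Bool.false_eq_true, if_false]]
            rw [ih (some k) true pm hpm (by simp [hkT]) (fun _ => hkT)]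
            simp only [evForm, List.map_cons, List.filter_cons, hmsi, hexe, evPick64, h64,
              Bool.false_eq_true, if_false, if_true, evOr_some]
          | true =>
            have hpeT := hse rfl
            rw [show evLoopA ((k, v) :: rest) pe true pm = evLoopA rest pe true pm from by
              simp only [evLoopA, hmF, he, hpeT, Bool.not_true, Bool.and_false, if_true,
                Bool.false_eq_true, if_false]]
            rw [ih pe true pm hpm hpe hse]
            simp only [evForm, List.map_cons, List.filter_cons, hmsi, hexe,
              Bool.false_eq_true, if_false, if_true]
        · have h64f : PySem.Str.isIn "64" k = false := Bool.eq_false_iff.mpr h64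
          cases se with
          | true =>
            have hpeT := hse rfl
            rw [show evLoopA ((k, v) :: rest) pe true pm = evLoopA rest pe true pm from by
              simp only [evLoopA, hmF, he, h64f, hpeT, Bool.not_true, Bool.and_false, if_true,
                Bool.false_eq_true, if_false]]
            rw [ih pe true pm hpm hpe hse]
            simp only [evForm, List.map_cons, List.filter_cons, hmsi, hexe,
              Bool.false_eq_true, if_false, if_true]
          | false =>
            by_cases hpeT : pvTruthy pe = true
            · rw [show evLoopA ((k, v) :: rest) pe false pm = evLoopA rest pe false pm from by
                simp only [evLoopA, hmF, he, h64f, hpeT, Bool.not_true, Bool.not_false,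
                  Bool.and_false, Bool.false_and, if_true, Bool.false_eq_true, if_false]]
              rw [ih pe false pm hpm hpe hse]
              simp only [evForm, List.map_cons, List.filter_cons, hmsi, hexe, evPick64, h64f,
                hpeT, Bool.false_eq_true, if_false, if_true]
            · have hp0 : pvTruthy pe = false := Bool.eq_false_iff.mpr hpeT
              rw [show evLoopA ((k, v) :: rest) pe false pm = evLoopA rest (some k) false pm from by
                simp only [evLoopA, hmF, he, h64f, hp0, Bool.not_false, Bool.and_true,
                  if_true, Bool.false_eq_true, if_false, ite_self]]
              rw [ih (some k) false pm hpm (by simp [hkT]) (by simp)]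
              simp only [evForm, List.map_cons, List.filter_cons, hmsi, hexe, evPick64, h64f,
                hp0, hkT, Bool.false_eq_true, if_false, if_true, List.head?_cons]
      · have heF : (PySem.Str.endswith k ".exe" && !(PySem.Str.isIn "arm" k)) = false :=
          Bool.eq_false_iff.mpr he
        have hexe : evIsExe k = false := heF
        rw [show evLoopA ((k, v) :: rest) pe se pm = evLoopA rest pe se pm from by
          simp only [evLoopA, hmF, heF, Bool.false_eq_true, if_false]]
        rw [ih pe se pm hpm hpe hse]
        simp only [evForm, List.map_cons, List.filter_cons, hmsi, hexe, Bool.false_eq_true,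
          if_false]

-- ===== VERDICT (by name: the statement is the Claim_ definition above) =====
theorem extract_versions_spec : Claim_equal_extract_versions := by
  intro v _
  unfold Spec_extract_versions extract_versions
  rw [evLoopA_eq v none false none (by intro m h; cases h) (by intro; rfl) (by intro h; cases h)]
  unfold extract_versions_alt
  cases hmsi : (v.map Prod.fst).filter evIsMsi with
  | nil => simp [evForm, hmsi, evPick_eq, evOr, evPick64, pvTruthy]
  | cons a t => simp [evForm, hmsi, evPick_eq, evOr, evPick64, pvTruthy]
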